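-- pv_equiv track=rewrite | github.com/leopas/teste-overlabs | concat_repo_all_text.py | prioritize_files_for_smart
-- ===== SOURCE A (Python) =====
-- from typing import Iterable, List, Set, Optional, Tuple, Dict, Any
--
-- def prioritize_files_for_smart(files: List[str]) -> List[str]:
--     """Prioriza arquivos para modo SMART: docs primeiro, depois código importante, depois resto."""
--     priority_patterns = [
--         # Prioridade 1: Documentação
--         (lambda f: any(f.lower().startswith(p) for p in ["readme", "docs/", "domain.md", "cursor_rules.md"]), 1),
--         # Prioridade 2: Configuração do projeto
--         (lambda f: any(f.lower().endswith(p) for p in ["pyproject.toml", "requirements.txt", "package.json", "docker-compose.yml", "docker-compose.yaml", "makefile"]), 2),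
--         # Prioridade 3: Entrypoints e código principal
--         (lambda f: any(f.lower().endswith(p) for p in ["main.py", "app.py", "server.py", "index.py", "main.go", "main.ts", "main.js", "index.ts", "index.js"]), 3),
--         (lambda f: "/api/" in f.lower() or "/routes/" in f.lower() or "/routers/" in f.lower() or "/controllers/" in f.lower(), 3),
--         # Prioridade 4: Models, schemas, entities
--         (lambda f: "/models/" in f.lower() or "/entities/" in f.lower() or "/schemas/" in f.lower(), 4),
--         (lambda f: "/migrations/" in f.lower(), 4),
--         # Prioridade 5: Resto
--         (lambda f: True, 5),
--     ]
--
--     prioritized = {1: [], 2: [], 3: [], 4: [], 5: []}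
--     seen = set()
--
--     for f in files:
--         if f in seen:
--             continue
--         for pattern_func, priority in priority_patterns:
--             if pattern_func(f):
--                 prioritized[priority].append(f)
--                 seen.add(f)
--                 break
--
--     result = []
--     for priority in sorted(prioritized.keys()):
--         result.extend(sorted(prioritized[priority]))
--
--     return result
-- ===== SOURCE B (Python) =====
-- from typing import List
--
-- def prioritize_files_for_smart(files: List[str]) -> List[str]:
--     """Same prioritization via one global sort on a (priority, name) composite key."""
--     priority_patterns = [
--         (lambda f: any(f.lower().startswith(p) for p in ["readme", "docs/", "domain.md", "cursor_rules.md"]), 1),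
--         (lambda f: any(f.lower().endswith(p) for p in ["pyproject.toml", "requirements.txt", "package.json", "docker-compose.yml", "docker-compose.yaml", "makefile"]), 2),
--         (lambda f: any(f.lower().endswith(p) for p in ["main.py", "app.py", "server.py", "index.py", "main.go", "main.ts", "main.js", "index.ts", "index.js"]), 3),
--         (lambda f: "/api/" in f.lower() or "/routes/" in f.lower() or "/routers/" in f.lower() or "/controllers/" in f.lower(), 3),
--         (lambda f: "/models/" in f.lower() or "/entities/" in f.lower() or "/schemas/" in f.lower(), 4),
--         (lambda f: "/migrations/" in f.lower(), 4),
--     ]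
--
--     def priority(f: str) -> int:
--         for pattern_func, p in priority_patterns:
--             if pattern_func(f):
--                 return p
--         return 5
--
--     unique = list(dict.fromkeys(files))
--     return sorted(unique, key=lambda f: (priority(f), f))
-- ===== Notes on version B (the rewrite author's own statement) =====
-- stated objective: simpler
-- what changed: B replaces A's five-bucket dict with seen-set bookkeeping plus five per-bucket sorts and a concatenation pass by a priority() helper, one dict.fromkeys dedup and a single global sort on the composite (priority, name) key.
import Mathlib
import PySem

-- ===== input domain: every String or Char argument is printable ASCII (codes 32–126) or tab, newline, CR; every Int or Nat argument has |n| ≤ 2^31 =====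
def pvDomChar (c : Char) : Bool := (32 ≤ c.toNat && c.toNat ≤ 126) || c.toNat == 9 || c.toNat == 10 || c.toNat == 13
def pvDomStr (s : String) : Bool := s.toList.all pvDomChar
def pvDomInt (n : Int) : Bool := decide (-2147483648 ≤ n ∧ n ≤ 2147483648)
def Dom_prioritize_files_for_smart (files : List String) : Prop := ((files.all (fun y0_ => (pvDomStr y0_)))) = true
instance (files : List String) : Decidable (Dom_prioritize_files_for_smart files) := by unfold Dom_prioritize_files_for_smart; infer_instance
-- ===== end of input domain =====

-- B replaces A's five-bucket dict + per-bucket sorts by one dedup pass and a single sort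
-- on the composite (priority, name) key; same return value, simpler decomposition.

-- shared pattern predicates (the lambdas of the Python priority_patterns list, used by both programs)
def pvIsDoc (f : String) : Bool :=
  ["readme", "docs/", "domain.md", "cursor_rules.md"].any
    (fun p => PySem.Str.startswith (PySem.Str.lower f) p)
def pvIsConfig (f : String) : Bool :=
  ["pyproject.toml", "requirements.txt", "package.json", "docker-compose.yml", "docker-compose.yaml", "makefile"].any
    (fun p => PySem.Str.endswith (PySem.Str.lower f) p)
def pvIsEntry (f : String) : Bool :=
  ["main.py", "app.py", "server.py", "index.py", "main.go", "main.ts", "main.js", "index.ts", "index.js"].any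
    (fun p => PySem.Str.endswith (PySem.Str.lower f) p)
def pvIsApi (f : String) : Bool :=
  PySem.Str.isIn "/api/" (PySem.Str.lower f) || PySem.Str.isIn "/routes/" (PySem.Str.lower f) ||
  PySem.Str.isIn "/routers/" (PySem.Str.lower f) || PySem.Str.isIn "/controllers/" (PySem.Str.lower f)
def pvIsModel (f : String) : Bool :=
  PySem.Str.isIn "/models/" (PySem.Str.lower f) || PySem.Str.isIn "/entities/" (PySem.Str.lower f) ||
  PySem.Str.isIn "/schemas/" (PySem.Str.lower f)
def pvIsMigration (f : String) : Bool := PySem.Str.isIn "/migrations/" (PySem.Str.lower f)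

-- ===== PORT A =====
-- A's priority_patterns list (includes the final catch-all (True, 5))
def pvPatternsA : List ((String → Bool) × Int) :=
  [(pvIsDoc, 1), (pvIsConfig, 2), (pvIsEntry, 3), (pvIsApi, 3), (pvIsModel, 4), (pvIsMigration, 4),
   (fun _ => true, 5)]

-- the inner 'for pattern_func, priority in priority_patterns: … break' loop
-- ('prioritized[priority].append(f)' never raises: keys 1–5 are preset and every priority is one of them,
--  so it is rendered with Dict.modify at an always-present key)
def pvLoopA (f : String) (st : PySem.Dict Int (List String) × PySem.Set String) :
    List ((String → Bool) × Int) → PySem.Dict Int (List String) × PySem.Set String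
  | [] => st
  | (pf, p) :: rest =>
    if pf f then (PySem.Dict.modify st.1 p [] (fun l => l ++ [f]), PySem.Set.add st.2 f)
    else pvLoopA f st rest

def prioritize_files_for_smart (files : List String) : List String :=
  let init : PySem.Dict Int (List String) := PySem.Dict.ofList [(1, []), (2, []), (3, []), (4, []), (5, [])]
  let st := files.foldl
    (fun st f => if PySem.Set.contains st.2 f then st else pvLoopA f st pvPatternsA)
    (init, PySem.Set.empty)
  -- 'prioritized[priority]' at a key of the dict: rendered with getD (the key is always present)
  (PySem.List.sorted (PySem.Dict.keys st.1) (fun k => k) false).foldl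
    (fun result priority => result ++ PySem.List.sorted (PySem.Dict.getD st.1 priority []) (fun s => s) false) []

-- ===== PORT B =====
-- B's priority_patterns list (no catch-all; priority() falls through to 5)
def pvPatternsB : List ((String → Bool) × Int) :=
  [(pvIsDoc, 1), (pvIsConfig, 2), (pvIsEntry, 3), (pvIsApi, 3), (pvIsModel, 4), (pvIsMigration, 4)]

def pvFirstPriority : List ((String → Bool) × Int) → String → Int
  | [], _ => 5
  | (pf, p) :: rest, f => if pf f then p else pvFirstPriority rest f

def pvPriority (f : String) : Int := pvFirstPriority pvPatternsB f

def prioritize_files_for_smart_alt (files : List String) : List String :=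
  PySem.List.sorted2 (PySem.List.dedup files) (fun f => pvPriority f) (fun f => f) false

-- ===== PRECONDITION & SPEC =====
def Spec_prioritize_files_for_smart (files : List String) (out : List String) : Prop := out = prioritize_files_for_smart_alt files
instance (files : List String) (out : List String) : Decidable (Spec_prioritize_files_for_smart files out) := by unfold Spec_prioritize_files_for_smart; infer_instance

-- ===== CLAIM (what is proved, stated in full; the proofs are below) =====
def Claim_equal_prioritize_files_for_smart : Prop := ∀ (files : List String), Dom_prioritize_files_for_smart files → Spec_prioritize_files_for_smart files (prioritize_files_for_smart files)

-- ===== LEMMAS AND PROOFS =====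

-- the bucket of priority k: the distinct files of priority k, in first-occurrence order
def pvBucket (files : List String) (k : Int) : List String :=
  (PySem.List.dedup files).filter (fun f => pvPriority f == k)

-- the common normal form: per-priority name-sorted buckets, concatenated
def pvNF (files : List String) : List String :=
  PySem.List.sorted (pvBucket files 1) (fun s => s) false ++
  PySem.List.sorted (pvBucket files 2) (fun s => s) false ++
  PySem.List.sorted (pvBucket files 3) (fun s => s) false ++
  PySem.List.sorted (pvBucket files 4) (fun s => s) false ++
  PySem.List.sorted (pvBucket files 5) (fun s => s) false

lemma pvPriority_cases (f : String) :
    pvPriority f = 1 ∨ pvPriority f = 2 ∨ pvPriority f = 3 ∨ pvPriority f = 4 ∨ pvPriority f = 5 := by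
  simp only [pvPriority, pvPatternsB, pvFirstPriority]
  split_ifs <;> simp

lemma pvLoopA_eq (f : String) (st : PySem.Dict Int (List String) × PySem.Set String) :
    pvLoopA f st pvPatternsA =
      (PySem.Dict.modify st.1 (pvPriority f) [] (fun l => l ++ [f]), PySem.Set.add st.2 f) := by
  simp only [pvPatternsA, pvPriority, pvPatternsB, pvLoopA, pvFirstPriority]
  split_ifs <;> rfl

lemma pv_sorted2_eq_of_perm_of_pairwise_lexlt {α κ₁ κ₂ : Type} [LinearOrder κ₁] [LinearOrder κ₂]
    (xs ys : List α) (k1 : α → κ₁) (k2 : α → κ₂)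
    (hperm : ys.Perm xs)
    (hpw : ys.Pairwise (fun a b => k1 a < k1 b ∨ (k1 a = k1 b ∧ k2 a < k2 b))) :
    PySem.List.sorted2 xs k1 k2 false = ys := by
  have hbe : (fun a b => decide (k1 a < k1 b) || (!decide (k1 b < k1 a) && decide (k2 a < k2 b)))
      = (fun a b => decide ((toLex (k1 a, k2 a) : κ₁ ×ₗ κ₂) < toLex (k1 b, k2 b))) := by
    funext a b
    rcases lt_trichotomy (k1 a) (k1 b) with h | h | h
    · simp [Prod.Lex.lt_iff, h]
    · simp [Prod.Lex.lt_iff, h]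
    · simp [Prod.Lex.lt_iff, asymm h, h, ne_of_gt h]
  have hkey : PySem.List.sorted2 xs k1 k2 false
      = PySem.List.sorted xs (fun x => (toLex (k1 x, k2 x) : κ₁ ×ₗ κ₂)) false := by
    simp only [PySem.List.sorted2, PySem.List.sorted, if_neg (by simp : ¬ (false = true))]
    rw [hbe]
  rw [hkey]
  exact PySem.List.sorted_eq_of_perm_of_pairwise_lt xs ys _ hperm
    (hpw.imp (fun {a b} h => by rcases h with h | ⟨h1, h2⟩ <;> simp [Prod.Lex.lt_iff, *]))

-- A's outer loop, with the inner pattern loop replaced by its value (pvLoopA_eq)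
def pvDStep (d : PySem.Dict Int (List String)) (f : String) : PySem.Dict Int (List String) :=
  PySem.Dict.modify d (pvPriority f) [] (fun l => l ++ [f])

def pvStep (st : PySem.Dict Int (List String) × PySem.Set String) (f : String) :
    PySem.Dict Int (List String) × PySem.Set String :=
  if PySem.Set.contains st.2 f then st else (pvDStep st.1 f, PySem.Set.add st.2 f)

-- the files not yet in `seen`, first occurrences only, in order
def pvFresh (seen : PySem.Set String) : List String → List String
  | [] => []
  | f :: t => if PySem.Set.contains seen f then pvFresh seen t else f :: pvFresh (PySem.Set.add seen f) t

lemma pvFold_eq (files : List String) (d : PySem.Dict Int (List String)) (seen : PySem.Set String) :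
    files.foldl pvStep (d, seen) = ((pvFresh seen files).foldl pvDStep d, PySem.Set.update seen files) := by
  induction files generalizing d seen with
  | nil => rfl
  | cons f t ih =>
    by_cases h : f ∈ seen
    · have hc : PySem.Set.contains seen f = true := by simp [PySem.Set.contains, h]
      have hadd : PySem.Set.add seen f = seen := by simp [PySem.Set.add, PySem.Set.contains, h]
      rw [List.foldl_cons, show pvStep (d, seen) f = (d, seen) from by simp [pvStep, h],
        pvFresh, if_pos hc, ih,
        show PySem.Set.update seen (f :: t) = PySem.Set.update seen t from by
          simp [PySem.Set.update, List.foldl_cons, hadd]]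
    · have hc : PySem.Set.contains seen f = false := by simp [PySem.Set.contains, h]
      rw [List.foldl_cons,
        show pvStep (d, seen) f = (pvDStep d f, PySem.Set.add seen f) from by simp [pvStep, h],
        pvFresh, if_neg (by simp [PySem.Set.contains, h]), ih, List.foldl_cons,
        show PySem.Set.update seen (f :: t) = PySem.Set.update (PySem.Set.add seen f) t from rfl]

lemma pvSeen_append (files : List String) (seen : PySem.Set String) :
    seen ++ pvFresh seen files = PySem.Set.update seen files := by
  induction files generalizing seen with
  | nil => simp [pvFresh, PySem.Set.update]
  | cons f t ih =>
    by_cases h : f ∈ seen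
    · have hc : PySem.Set.contains seen f = true := by simp [PySem.Set.contains, h]
      have hadd : PySem.Set.add seen f = seen := by simp [PySem.Set.add, PySem.Set.contains, h]
      rw [pvFresh, if_pos hc, ih,
        show PySem.Set.update seen (f :: t) = PySem.Set.update seen t from by
          simp [PySem.Set.update, List.foldl_cons, hadd]]
    · have hc : PySem.Set.contains seen f = false := by simp [PySem.Set.contains, h]
      have hadd : PySem.Set.add seen f = seen ++ [f] := by simp [PySem.Set.add, PySem.Set.contains, h]
      rw [pvFresh, if_neg (by simp [PySem.Set.contains, h])]
      calc seen ++ (f :: pvFresh (PySem.Set.add seen f) t)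
          = (seen ++ [f]) ++ pvFresh (PySem.Set.add seen f) t := by simp
        _ = PySem.Set.add seen f ++ pvFresh (PySem.Set.add seen f) t := by rw [hadd]
        _ = PySem.Set.update (PySem.Set.add seen f) t := ih _
        _ = PySem.Set.update seen (f :: t) := rfl

lemma pvFresh_empty (files : List String) : pvFresh PySem.Set.empty files = PySem.List.dedup files := by
  have h := pvSeen_append files PySem.Set.empty
  rw [show (PySem.Set.empty : PySem.Set String) = [] from rfl] at h
  rw [List.nil_append] at h
  show pvFresh [] files = _
  rw [h]
  rfl

def pvInit : PySem.Dict Int (List String) := PySem.Dict.ofList [(1, []), (2, []), (3, []), (4, []), (5, [])]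

lemma pvBucket_getD (files : List String) (k : Int)
    (hk : k = 1 ∨ k = 2 ∨ k = 3 ∨ k = 4 ∨ k = 5) :
    ((PySem.List.dedup files).foldl pvDStep pvInit).getD k [] = pvBucket files k := by
  have hmap : (PySem.List.dedup files).foldl pvDStep pvInit
      = ((PySem.List.dedup files).map (fun f => (pvPriority f, f))).foldl
          (fun d p => PySem.Dict.modify d p.1 [] (fun l => l ++ [p.2])) pvInit := by
    rw [List.foldl_map]
    rfl
  rw [hmap, PySem.Dict.getD_foldl_modify_append]
  have hinit : pvInit.getD k [] = [] := by
    rcases hk with h | h | h | h | h <;> subst h <;> rfl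
  rw [hinit, List.filter_map, List.map_map]
  simp [pvBucket, Function.comp_def]

lemma pvKeys (files : List String) :
    ((PySem.List.dedup files).foldl pvDStep pvInit).keys = [1, 2, 3, 4, 5] := by
  have h := PySem.Dict.keys_foldl_modify_key (PySem.List.dedup files) pvPriority []
    (fun _ x => fun l => l ++ [x]) pvInit
  rw [show (PySem.List.dedup files).foldl pvDStep pvInit
      = (PySem.List.dedup files).foldl
          (fun d x => PySem.Dict.modify d (pvPriority x) [] ((fun _ x => fun l => l ++ [x]) d x)) pvInit from rfl, h]
  have : ∀ l : List String, PySem.Set.update ([1,2,3,4,5] : List Int) (l.map pvPriority) = [1,2,3,4,5] := by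
    intro l
    induction l with
    | nil => rfl
    | cons f t ih =>
      have hadd : PySem.Set.add ([1,2,3,4,5] : List Int) (pvPriority f) = [1,2,3,4,5] := by
        rcases pvPriority_cases f with h | h | h | h | h <;> rw [h] <;> rfl
      simp [PySem.Set.update, List.foldl_cons, hadd] at *
      exact ih
  rw [show pvInit.keys = ([1,2,3,4,5] : List Int) from rfl]
  exact this _

lemma pvPerm (l : List String) :
    (l.filter (fun f => pvPriority f == 1) ++ l.filter (fun f => pvPriority f == 2) ++
     l.filter (fun f => pvPriority f == 3) ++ l.filter (fun f => pvPriority f == 4) ++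
     l.filter (fun f => pvPriority f == 5)).Perm l := by
  rw [List.perm_iff_count]
  intro a
  have hz : ∀ k : Int, pvPriority a ≠ k → List.count a (l.filter (fun f => pvPriority f == k)) = 0 := by
    intro k hk
    rw [List.count_eq_zero]
    simp only [List.mem_filter, beq_iff_eq, not_and]
    exact fun _ => hk
  simp only [List.count_append]
  rcases pvPriority_cases a with h | h | h | h | h
  · rw [List.count_filter (p := fun f => pvPriority f == 1) (by simp [h])]
    rw [hz 2 (by omega), hz 3 (by omega), hz 4 (by omega), hz 5 (by omega)]
    omega
  · rw [List.count_filter (p := fun f => pvPriority f == 2) (by simp [h])]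
    rw [hz 1 (by omega), hz 3 (by omega), hz 4 (by omega), hz 5 (by omega)]
    omega
  · rw [List.count_filter (p := fun f => pvPriority f == 3) (by simp [h])]
    rw [hz 1 (by omega), hz 2 (by omega), hz 4 (by omega), hz 5 (by omega)]
    omega
  · rw [List.count_filter (p := fun f => pvPriority f == 4) (by simp [h])]
    rw [hz 1 (by omega), hz 2 (by omega), hz 3 (by omega), hz 5 (by omega)]
    omega
  · rw [List.count_filter (p := fun f => pvPriority f == 5) (by simp [h])]
    rw [hz 1 (by omega), hz 2 (by omega), hz 3 (by omega), hz 4 (by omega)]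
    omega

lemma pvMem_sorted_bucket (files : List String) (k : Int) (a : String)
    (ha : a ∈ PySem.List.sorted (pvBucket files k) (fun s => s) false) : pvPriority a = k := by
  rw [PySem.List.mem_sorted] at ha
  simp only [pvBucket, List.mem_filter, beq_iff_eq] at ha
  exact ha.2

lemma pvSorted_bucket_lt (files : List String) (k : Int) :
    (PySem.List.sorted (pvBucket files k) (fun s => s) false).Pairwise (fun a b => a < b) := by
  have hnd : (PySem.List.sorted (pvBucket files k) (fun s => s) false).Nodup := by
    refine ((PySem.List.sorted_perm (pvBucket files k) (fun s => s) false).symm.nodup ?_)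
    exact (PySem.List.nodup_dedup files).filter _
  have hle := PySem.List.sorted_pairwise (pvBucket files k) (fun s => s)
  exact (hle.and hnd).imp (fun {a b} h => lt_of_le_of_ne h.1 h.2)

lemma pvNF_pairwise (files : List String) :
    (pvNF files).Pairwise
      (fun a b => pvPriority a < pvPriority b ∨ (pvPriority a = pvPriority b ∧ a < b)) := by
  have hw : ∀ k, (PySem.List.sorted (pvBucket files k) (fun s => s) false).Pairwise
      (fun a b => pvPriority a < pvPriority b ∨ (pvPriority a = pvPriority b ∧ a < b)) := by
    intro k
    refine List.Pairwise.imp_of_mem ?_ (pvSorted_bucket_lt files k)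
    intro a b ha hb hlt
    exact Or.inr ⟨by rw [pvMem_sorted_bucket files k a ha, pvMem_sorted_bucket files k b hb], hlt⟩
  have hcross : ∀ j k : Int, j < k →
      ∀ a ∈ PySem.List.sorted (pvBucket files j) (fun s => s) false,
      ∀ b ∈ PySem.List.sorted (pvBucket files k) (fun s => s) false,
      pvPriority a < pvPriority b ∨ (pvPriority a = pvPriority b ∧ a < b) := by
    intro j k hjk a ha b hb
    exact Or.inl (by rw [pvMem_sorted_bucket files j a ha, pvMem_sorted_bucket files k b hb]; exact hjk)
  unfold pvNF
  simp only [List.pairwise_append, List.mem_append]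
  refine ⟨⟨⟨⟨hw 1, hw 2, ?_⟩, hw 3, ?_⟩, hw 4, ?_⟩, hw 5, ?_⟩ <;> intro a ha b hb
  · exact hcross 1 2 (by omega) a ha b hb
  · rcases ha with ha | ha
    · exact hcross 1 3 (by omega) a ha b hb
    · exact hcross 2 3 (by omega) a ha b hb
  · rcases ha with (ha | ha) | ha
    · exact hcross 1 4 (by omega) a ha b hb
    · exact hcross 2 4 (by omega) a ha b hb
    · exact hcross 3 4 (by omega) a ha b hb
  · rcases ha with ((ha | ha) | ha) | ha
    · exact hcross 1 5 (by omega) a ha b hb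
    · exact hcross 2 5 (by omega) a ha b hb
    · exact hcross 3 5 (by omega) a ha b hb
    · exact hcross 4 5 (by omega) a ha b hb

lemma pvNF_perm (files : List String) : (pvNF files).Perm (PySem.List.dedup files) := by
  have h1 : (pvNF files).Perm
      (pvBucket files 1 ++ pvBucket files 2 ++ pvBucket files 3 ++ pvBucket files 4 ++ pvBucket files 5) :=
    ((((PySem.List.sorted_perm (pvBucket files 1) (fun s => s) false).append
        (PySem.List.sorted_perm (pvBucket files 2) (fun s => s) false)).append
        (PySem.List.sorted_perm (pvBucket files 3) (fun s => s) false)).append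
        (PySem.List.sorted_perm (pvBucket files 4) (fun s => s) false)).append
        (PySem.List.sorted_perm (pvBucket files 5) (fun s => s) false)
  exact h1.trans (pvPerm (PySem.List.dedup files))

lemma pvA_eq_NF (files : List String) : prioritize_files_for_smart files = pvNF files := by
  have hfun : (fun (st : PySem.Dict Int (List String) × PySem.Set String) f =>
      if PySem.Set.contains st.2 f then st else pvLoopA f st pvPatternsA) = pvStep := by
    funext st f
    rw [pvLoopA_eq]
    rfl
  unfold prioritize_files_for_smart
  rw [hfun]
  rw [show (PySem.Dict.ofList [(1, []), (2, []), (3, []), (4, []), (5, [])] : PySem.Dict Int (List String)) = pvInit from rfl]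
  simp only [pvFold_eq files pvInit PySem.Set.empty, pvFresh_empty files, pvKeys files]
  rw [show PySem.List.sorted ([1, 2, 3, 4, 5] : List Int) (fun k => k) false = [1, 2, 3, 4, 5] from rfl]
  simp only [List.foldl_cons, List.foldl_nil, List.nil_append]
  rw [pvBucket_getD files 1 (by omega), pvBucket_getD files 2 (by omega),
    pvBucket_getD files 3 (by omega), pvBucket_getD files 4 (by omega),
    pvBucket_getD files 5 (by omega)]
  simp [pvNF, List.append_assoc]

lemma pvB_eq_NF (files : List String) : prioritize_files_for_smart_alt files = pvNF files := by
  unfold prioritize_files_for_smart_alt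
  exact pv_sorted2_eq_of_perm_of_pairwise_lexlt (PySem.List.dedup files) (pvNF files)
    (fun f => pvPriority f) (fun f => f) (pvNF_perm files) (pvNF_pairwise files)

-- ===== VERDICT (by name: the statement is the Claim_ definition above) =====
theorem prioritize_files_for_smart_spec : Claim_equal_prioritize_files_for_smart := by
  intro files _
  unfold Spec_prioritize_files_for_smart
  rw [pvA_eq_NF files, pvB_eq_NF files]
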